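-- pv_equiv track=rewrite | github.com/Awlstn/programmers | 프로그래머스_알고리즘_고득점Kit/해시/폰켓몬.py | solution
-- ===== SOURCE A (Python) =====
-- def solution(nums):
--
--     N2 = len(nums)//2 # 최대로 고를 수 있는 값
--     dnum = [] # 다른 종류만 들어갈 리스트
--
--     for num in nums: # 다양한 종류의 폰켓몬 리스트를 돌면서
--         if num not in dnum: # 다른 종류의 포켓몬 리스트에 num값이 없다면
--             dnum.append(num) # 다른 종류 모으는 리스트에 저장
--
--     if len(dnum) < N2: # 서로 다른 종류의 수가 최대로 고를 수 있는 수보다 작으면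
--         return len(dnum)
--     else: # 서로 다른 종류의 수가 최대로 고를 수 있는 수보다 같거나 크면
--         return N2
-- ===== SOURCE B (Python) =====
-- def solution(nums):
--     s = sorted(nums)
--     distinct = 0
--     prev = None
--     for x in s:
--         if prev is None or x != prev:
--             distinct += 1
--         prev = x
--     return min(distinct, len(nums) // 2)
-- ===== Notes on version B (the rewrite author's own statement) =====
-- stated objective: faster
-- what changed: B sorts the list once and counts a distinct value whenever an element differs from its predecessor, instead of A's quadratic list-membership scan building a dedup list.
import Mathlib
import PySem

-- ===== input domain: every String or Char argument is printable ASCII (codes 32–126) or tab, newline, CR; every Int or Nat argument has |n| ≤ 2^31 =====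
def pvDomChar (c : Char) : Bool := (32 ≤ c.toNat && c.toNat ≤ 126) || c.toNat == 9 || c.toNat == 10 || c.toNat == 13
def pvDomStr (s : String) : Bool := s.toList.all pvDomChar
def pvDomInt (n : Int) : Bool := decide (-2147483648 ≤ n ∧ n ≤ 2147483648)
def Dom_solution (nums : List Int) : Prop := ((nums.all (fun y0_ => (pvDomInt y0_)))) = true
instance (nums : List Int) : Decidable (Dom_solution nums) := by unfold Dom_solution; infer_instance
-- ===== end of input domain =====

-- B replaces A's quadratic membership-scan dedup by one sort plus a linear
-- adjacent-comparison pass counting distinct values.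

-- ===== PORT A =====
def solution (nums : List Int) : Int :=
  let N2 : Int := PySem.Int.floordiv (nums.length : Int) 2
  let dnum : List Int := nums.foldl (fun d num => if num ∈ d then d else d ++ [num]) []
  if (dnum.length : Int) < N2 then (dnum.length : Int) else N2

-- ===== PORT B =====
def solution_alt (nums : List Int) : Int :=
  let s := PySem.List.sorted nums (fun x => x) false
  let r := s.foldl
    (fun (st : Int × Option Int) x =>
      (if st.2 = none ∨ some x ≠ st.2 then st.1 + 1 else st.1, some x))
    (0, none)
  min r.1 (PySem.Int.floordiv (nums.length : Int) 2)

-- ===== PRECONDITION & SPEC =====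
def Spec_solution (nums : List Int) (out : Int) : Prop := out = solution_alt nums
instance (nums : List Int) (out : Int) : Decidable (Spec_solution nums out) := by unfold Spec_solution; infer_instance

-- ===== CLAIM (what is proved, stated in full; the proofs are below) =====
def Claim_equal_solution : Prop := ∀ (nums : List Int), Dom_solution nums → Spec_solution nums (solution nums)

-- ===== LEMMAS AND PROOFS =====

-- A's accumulator stays duplicate-free
lemma a_fold_nodup (nums : List Int) :
    ∀ d : List Int, d.Nodup →
      (nums.foldl (fun d num => if num ∈ d then d else d ++ [num]) d).Nodup := by
  induction nums with
  | nil => intro d hd; simpa using hd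
  | cons x t ih =>
      intro d hd
      simp only [List.foldl_cons]
      by_cases hx : x ∈ d
      · simp only [if_pos hx]; exact ih d hd
      · simp only [if_neg hx]
        refine ih _ ?_
        simp only [List.nodup_append, hd, List.nodup_singleton, true_and]
        intro a ha b hb heq
        rw [List.mem_singleton] at hb
        subst hb
        exact hx (heq ▸ ha)

-- A's accumulator collects exactly the values seen
lemma a_fold_toFinset (nums : List Int) :
    ∀ d : List Int,
      (nums.foldl (fun d num => if num ∈ d then d else d ++ [num]) d).toFinset
        = d.toFinset ∪ nums.toFinset := by
  induction nums with
  | nil => intro d; simp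
  | cons x t ih =>
      intro d
      simp only [List.foldl_cons]
      by_cases hx : x ∈ d
      · rw [if_pos hx, ih]
        ext y
        simp only [Finset.mem_union, List.mem_toFinset, List.mem_cons]
        constructor
        · rintro (h | h) <;> tauto
        · rintro (h | rfl | h)
          · tauto
          · exact Or.inl hx
          · tauto
      · rw [if_neg hx, ih]
        ext y
        simp only [Finset.mem_union, List.mem_toFinset, List.mem_append,
          List.mem_cons]
        tauto

-- B's pass on a sorted tail with all elements ≥ prev
lemma b_fold_sorted (s : List Int) (hs : s.Pairwise (· ≤ ·)) :
    ∀ (c : Int) (p : Int), (∀ x ∈ s, p ≤ x) →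
      (s.foldl
        (fun (st : Int × Option Int) x =>
          (if st.2 = none ∨ some x ≠ st.2 then st.1 + 1 else st.1, some x))
        (c, some p)).1 = c + ((s.toFinset \ {p}).card : Int) := by
  induction s with
  | nil => intro c p _; simp
  | cons x t ih =>
      intro c p hp
      have ht : t.Pairwise (· ≤ ·) := hs.of_cons
      have hxt : ∀ y ∈ t, x ≤ y := fun y hy => (List.pairwise_cons.mp hs).1 y hy
      simp only [List.foldl_cons]
      by_cases hxp : x = p
      · subst hxp
        have hc : ¬(((c, some x) : Int × Option Int).2 = none ∨ some x ≠ ((c, some x) : Int × Option Int).2) := by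
          simp
        rw [if_neg hc]
        rw [ih ht c x hxt]
        have hset : (x :: t).toFinset \ {x} = t.toFinset \ {x} := by
          ext y
          simp only [List.toFinset_cons, Finset.mem_sdiff, Finset.mem_insert,
            Finset.mem_singleton]
          tauto
        rw [hset]
      · have hc : (((c, some p) : Int × Option Int).2 = none ∨ some x ≠ ((c, some p) : Int × Option Int).2) := by
          simp [hxp]
        rw [if_pos hc]
        rw [ih ht (c + 1) x hxt]
        have hpnot : p ∉ insert x t.toFinset := by
          intro h
          rcases Finset.mem_insert.mp h with h | h
          · exact hxp h.symm
          · have := hxt p (List.mem_toFinset.mp h)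
            have := hp x (by simp)
            omega
        have h1 : (insert x t.toFinset \ {p}) = insert x t.toFinset := by
          apply Finset.sdiff_eq_self_of_disjoint
          simp [Finset.disjoint_singleton_right, hpnot]
        have h2 : (insert x t.toFinset).card = (t.toFinset \ {x}).card + 1 := by
          have : insert x t.toFinset = insert x (t.toFinset \ {x}) := by
            ext y; simp [Finset.mem_insert, Finset.mem_sdiff]; tauto
          rw [this, Finset.card_insert_of_notMem (by simp)]
        simp only [List.toFinset_cons, h1, h2]
        push_cast
        ring

-- B's count over the whole sorted list is the number of distinct values
lemma b_count (nums : List Int) :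
    ((PySem.List.sorted nums (fun x => x) false).foldl
      (fun (st : Int × Option Int) x =>
        (if st.2 = none ∨ some x ≠ st.2 then st.1 + 1 else st.1, some x))
      (0, none)).1 = (nums.toFinset.card : Int) := by
  have hperm : (PySem.List.sorted nums (fun x => x) false).Perm nums :=
    PySem.List.sorted_perm ..
  have hfin : (PySem.List.sorted nums (fun x => x) false).toFinset = nums.toFinset :=
    List.toFinset_eq_of_perm _ _ hperm
  have hs : (PySem.List.sorted nums (fun x => x) false).Pairwise (· ≤ ·) := by
    simpa using PySem.List.sorted_pairwise (xs := nums) (key := fun x => x)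
  rw [← hfin]
  cases h : PySem.List.sorted nums (fun x => x) false with
  | nil => simp
  | cons x t =>
      rw [h] at hs
      have ht : t.Pairwise (· ≤ ·) := hs.of_cons
      have hxt : ∀ y ∈ t, x ≤ y := fun y hy => (List.pairwise_cons.mp hs).1 y hy
      simp only [List.foldl_cons, true_or, if_true]
      rw [b_fold_sorted t ht (0 + 1) x hxt]
      have : insert x t.toFinset = insert x (t.toFinset \ {x}) := by
        ext y; simp [Finset.mem_insert, Finset.mem_sdiff]; tauto
      rw [List.toFinset_cons, this, Finset.card_insert_of_notMem (by simp)]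
      push_cast
      ring

-- A's dedup-list length is also the number of distinct values
lemma a_count (nums : List Int) :
    ((nums.foldl (fun d num => if num ∈ d then d else d ++ [num]) []).length : Int)
      = (nums.toFinset.card : Int) := by
  have hnd := a_fold_nodup nums [] (by simp)
  have hfs := a_fold_toFinset nums []
  simp only [List.toFinset_nil, Finset.empty_union] at hfs
  rw [← hfs, List.toFinset_card_of_nodup hnd]

-- ===== VERDICT (by name: the statement is the Claim_ definition above) =====
theorem solution_spec : Claim_equal_solution := by
  intro nums _
  unfold Spec_solution solution solution_alt
  simp only []
  rw [a_count, b_count]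
  by_cases hlt : (nums.toFinset.card : Int) < PySem.Int.floordiv (nums.length : Int) 2
  · rw [if_pos hlt, min_eq_left (le_of_lt hlt)]
  · rw [if_neg hlt, min_eq_right (by omega)]
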